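-- pv_equiv track=rewrite | github.com/anchitshrivastava/Twitter_Scraping | datacleaning.py | extracting_hyperlink
-- ===== SOURCE A (Python) =====
-- def extracting_hyperlink(text):
--     text1 = text.split(" ")
--     for i in text1:
--         if 'https://t.co/' in i:
--             link = i
--             text.replace(i,'')
--             return link
--         else:
--             pass
-- ===== SOURCE B (Python) =====
-- def extracting_hyperlink(text):
--     # Locate the first occurrence of the link, then rebuild its space-token
--     # from the text around it, instead of splitting the whole text and scanning.
--     idx = text.find('https://t.co/')
--     if idx == -1:
--         return None
--     return text[:idx].split(" ")[-1] + text[idx:].split(" ")[0]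
-- ===== Notes on version B (the rewrite author's own statement) =====
-- stated objective: alternative
-- what changed: Instead of splitting the text on spaces and scanning the token list for the first token containing the link substring, B locates the first occurrence with str.find and rebuilds that token from the characters around the match position.
import Mathlib
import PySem

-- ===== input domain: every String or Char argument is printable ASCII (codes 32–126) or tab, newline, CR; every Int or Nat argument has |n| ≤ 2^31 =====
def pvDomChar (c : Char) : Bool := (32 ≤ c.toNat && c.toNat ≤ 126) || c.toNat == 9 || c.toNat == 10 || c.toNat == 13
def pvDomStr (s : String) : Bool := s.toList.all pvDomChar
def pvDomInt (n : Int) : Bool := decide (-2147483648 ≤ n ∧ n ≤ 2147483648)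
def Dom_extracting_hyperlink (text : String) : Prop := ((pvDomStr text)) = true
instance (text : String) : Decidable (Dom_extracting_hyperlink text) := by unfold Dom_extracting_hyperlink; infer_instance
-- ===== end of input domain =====

-- B rebuilds the link's space-token from the position str.find locates instead of scanning the split token list; objective: alternative (similar cost).

-- ===== PORT A =====
-- A: text1 = text.split(" "); for i in text1: if 'https://t.co/' in i: return i  (implicit None).
-- The statement text.replace(i,'') discards its result in Python, so it is stateless and not ported.
-- " " is a nonempty separator, so PySem.Str.split? is always `some`; the .getD [] is exact.
def extracting_hyperlink (text : String) : Option String :=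
  let text1 := (PySem.Str.split? text " ").getD []
  text1.find? (fun i => PySem.Str.isIn "https://t.co/" i)

-- ===== PORT B =====
-- B: idx = text.find('https://t.co/'); None if -1; else text[:idx].split(" ")[-1] + text[idx:].split(" ")[0].
-- split(" ") (nonempty sep) never returns an empty list, so the [-1]/[0] indexings never raise; .getD is exact.
def extracting_hyperlink_alt (text : String) : Option String :=
  let idx := PySem.Str.find text "https://t.co/"
  if idx = -1 then none
  else
    let pre := PySem.Str.slice text none (some idx)
    let post := PySem.Str.slice text (some idx) none
    let s := (PySem.List.pyGet? ((PySem.Str.split? pre " ").getD []) (-1)).getD ""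
    let e := (PySem.List.pyGet? ((PySem.Str.split? post " ").getD []) 0).getD ""
    some (s ++ e)

-- ===== PRECONDITION & SPEC =====
def Spec_extracting_hyperlink (text : String) (out : Option String) : Prop := out = extracting_hyperlink_alt text
instance (text : String) (out : Option String) : Decidable (Spec_extracting_hyperlink text out) := by unfold Spec_extracting_hyperlink; infer_instance

-- ===== CLAIM (what is proved, stated in full; the proofs are below) =====
def Claim_equal_extracting_hyperlink : Prop := ∀ (text : String), Dom_extracting_hyperlink text → Spec_extracting_hyperlink text (extracting_hyperlink text)

-- ===== LEMMAS AND PROOFS =====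
def spl : List Char → List (List Char)
  | [] => [[]]
  | c :: cs =>
    if c = ' ' then [] :: spl cs
    else
      match spl cs with
      | [] => [[c]]
      | t :: ts => (c :: t) :: ts

theorem spl_ne_nil (cs : List Char) : spl cs ≠ [] := by
  induction cs with
  | nil => simp [spl]
  | cons c cs ih =>
    simp only [spl]
    split
    · simp
    · split <;> simp

theorem spl_no_space (t : List Char) (h : ' ' ∉ t) : spl t = [t] := by
  induction t with
  | nil => rfl
  | cons c cs ih =>
    simp only [List.mem_cons, not_or] at h
    have hc : ¬ c = ' ' := fun hc => h.1 hc.symm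
    simp only [spl, if_neg hc]
    rw [ih h.2]

theorem spl_sep (t r : List Char) (h : ' ' ∉ t) : spl (t ++ ' ' :: r) = t :: spl r := by
  induction t with
  | nil => simp [spl]
  | cons c cs ih =>
    simp only [List.mem_cons, not_or] at h
    have hc : c ≠ ' ' := fun hc => h.1 hc.symm
    simp only [List.cons_append, spl, if_neg hc, ih h.2]

theorem prefix_of_append_of_le {sub a b : List Char} (h : sub <+: a ++ b)
    (hl : sub.length ≤ a.length) : sub <+: a := by
  have := List.prefix_iff_eq_take.mp h
  rw [List.take_append_of_le_length hl] at this
  exact this ▸ List.take_prefix _ _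

theorem pyGet?_neg_one {α : Type} (xs : List α) : PySem.List.pyGet? xs (-1) = xs.getLast? := by
  cases xs with
  | nil => rfl
  | cons x l =>
    simp only [PySem.List.pyGet?, PySem.List.pyIdx?]
    norm_num
    rw [List.getLast?_eq_getElem?]
    simp

theorem pyGet?_zero {α : Type} (xs : List α) : PySem.List.pyGet? xs 0 = xs.head? := by
  cases xs with
  | nil => rfl
  | cons x l => simp [PySem.List.pyGet?, PySem.List.pyIdx?]

theorem getLast?_cons_of_ne_nil {α : Type} (a : α) {l : List α} (h : l ≠ []) :
    (a :: l).getLast? = l.getLast? := by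
  cases l with
  | nil => exact absurd rfl h
  | cons b m => simp [List.getLast?_cons_cons]

def consH (p : List Char) : List (List Char) → List (List Char)
  | [] => [p]
  | t :: ts => (p ++ t) :: ts

theorem go_spec (fuel : Nat) (l cur : List Char) (acc : List (List Char))
    (h : l.length ≤ fuel) :
    PySem.Chars.splitOn.go [' '] fuel l cur acc = acc.reverse ++ consH cur.reverse (spl l) := by
  induction fuel generalizing l cur acc with
  | zero =>
    have hl : l = [] := List.eq_nil_of_length_eq_zero (Nat.le_zero.mp h)
    subst hl
    show ((cur.reverse ++ []) :: acc).reverse = _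
    simp [spl, consH]
  | succ fuel ih =>
    cases l with
    | nil =>
      show (cur.reverse :: acc).reverse = _
      simp [spl, consH]
    | cons c rest =>
      rw [show PySem.Chars.splitOn.go [' '] (fuel+1) (c :: rest) cur acc =
        if [' '].isPrefixOf (c :: rest) then
          PySem.Chars.splitOn.go [' '] fuel (List.drop 1 (c::rest)) [] (cur.reverse :: acc)
        else PySem.Chars.splitOn.go [' '] fuel rest (c :: cur) acc from rfl]
      have hlen : rest.length ≤ fuel := by simpa using h
      obtain ⟨t, ts, hts⟩ := List.exists_cons_of_ne_nil (spl_ne_nil rest)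
      by_cases hc : c = ' '
      · subst hc
        rw [if_pos (by simp [List.isPrefixOf])]
        rw [List.drop_one, List.tail_cons, ih rest [] (cur.reverse :: acc) hlen]
        simp [spl, consH, hts]
      · rw [if_neg (by simp [List.isPrefixOf]; exact fun hc' => hc hc'.symm)]
        rw [ih rest (c :: cur) acc hlen]
        simp [spl, consH, hts, if_neg hc]

theorem split?_eq_spl (cs : List Char) : PySem.Chars.split? cs [' '] = some (spl cs) := by
  have : PySem.Chars.splitOn cs [' '] = spl cs := by
    show PySem.Chars.splitOn.go [' '] (cs.length + 1) cs [] [] = spl cs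
    rw [go_spec _ _ _ _ (by omega)]
    obtain ⟨t, ts, hts⟩ := List.exists_cons_of_ne_nil (spl_ne_nil cs)
    simp [consH, hts]
  simp [PySem.Chars.split?, this]

def hlink : List Char := "https://t.co/".toList

theorem space_not_mem_hlink : ' ' ∉ hlink := by decide

theorem hlink_len : hlink.length = 13 := by decide

theorem find_eq_of (cs sub : List Char) (k : Nat)
    (h1 : sub <+: cs.drop k) (h2 : ∀ i < k, ¬ sub <+: cs.drop i) :
    PySem.Chars.find cs sub = (k : Int) := by
  have hinf : sub <:+: cs := h1.isInfix.trans (List.drop_suffix k cs).isInfix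
  have hnn : 0 ≤ PySem.Chars.find cs sub := (PySem.Chars.find_nonneg_iff _ _).mpr hinf
  obtain ⟨hp, hmin⟩ := PySem.Chars.find_spec hnn
  rcases lt_trichotomy (PySem.Chars.find cs sub).toNat k with h | h | h
  · exact absurd hp (h2 _ h)
  · omega
  · exact absurd h1 (hmin k h)

theorem no_prefix_low (t r : List Char) (ht : PySem.Chars.isIn hlink t = false)
    (i : Nat) (hi : i ≤ t.length) : ¬ hlink <+: (t ++ ' ' :: r).drop i := by
  intro hp
  have hdrop : (t ++ ' ' :: r).drop i = t.drop i ++ ' ' :: r := by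
    rw [List.drop_append, Nat.sub_eq_zero_of_le hi, List.drop_zero]
  rw [hdrop] at hp
  by_cases hl : hlink.length ≤ (t.drop i).length
  · have hpt : hlink <+: t.drop i := prefix_of_append_of_le hp hl
    have : hlink <:+: t := hpt.isInfix.trans (List.drop_suffix i t).isInfix
    rw [PySem.Chars.isIn_eq_false_iff] at ht
    exact ht this
  · have hj : (t.drop i).length < hlink.length := by omega
    have h2 := hp.getElem hj
    rw [List.getElem_append_right (le_refl (t.drop i).length)] at h2
    simp only [Nat.sub_self, List.getElem_cons_zero] at h2
    exact space_not_mem_hlink (h2 ▸ List.getElem_mem hj)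

theorem fcase1 (t r : List Char) (ht : PySem.Chars.isIn hlink t = true) :
    PySem.Chars.find (t ++ ' ' :: r) hlink = PySem.Chars.find t hlink := by
  have hinf : hlink <:+: t := (PySem.Chars.isIn_iff_infix _ _).mp ht
  have hnn : 0 ≤ PySem.Chars.find t hlink := (PySem.Chars.find_nonneg_iff _ _).mpr hinf
  obtain ⟨hp, hmin⟩ := PySem.Chars.find_spec hnn
  have hlen : hlink.length ≤ (t.drop (PySem.Chars.find t hlink).toNat).length := hp.length_le
  have hft : (PySem.Chars.find t hlink).toNat + 13 ≤ t.length := by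
    rw [List.length_drop, hlink_len] at hlen; omega
  rw [find_eq_of (t ++ ' ' :: r) hlink (PySem.Chars.find t hlink).toNat ?_ ?_]
  · omega
  · rw [List.drop_append, Nat.sub_eq_zero_of_le (by omega), List.drop_zero]
    exact hp.trans ((t.drop _).prefix_append _)
  · intro i hik hpre
    have hit : i ≤ t.length := by omega
    rw [List.drop_append, Nat.sub_eq_zero_of_le hit, List.drop_zero] at hpre
    have : hlink <+: t.drop i :=
      prefix_of_append_of_le hpre (by rw [hlink_len, List.length_drop]; omega)
    exact hmin i hik this

theorem find_mem_le (t : List Char) (ht : PySem.Chars.isIn hlink t = true) :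
    0 ≤ PySem.Chars.find t hlink ∧
      (PySem.Chars.find t hlink).toNat + hlink.length ≤ t.length := by
  have hinf : hlink <:+: t := (PySem.Chars.isIn_iff_infix _ _).mp ht
  have hnn : 0 ≤ PySem.Chars.find t hlink := (PySem.Chars.find_nonneg_iff _ _).mpr hinf
  obtain ⟨hp, _⟩ := PySem.Chars.find_spec hnn
  have hlen := hp.length_le
  rw [List.length_drop, hlink_len] at hlen
  exact ⟨hnn, by rw [hlink_len]; omega⟩

theorem fcase2 (t r : List Char) (ht : PySem.Chars.isIn hlink t = false) :
    PySem.Chars.find (t ++ ' ' :: r) hlink =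
      if PySem.Chars.find r hlink = -1 then -1
      else (t.length : Int) + 1 + PySem.Chars.find r hlink := by
  by_cases hr : PySem.Chars.find r hlink = -1
  · rw [if_pos hr, PySem.Chars.find_eq_neg_one_iff]
    intro hinf
    have hisin : PySem.Chars.isIn hlink (t ++ ' ' :: r) = true :=
      (PySem.Chars.isIn_iff_infix _ _).mpr hinf
    obtain ⟨j, hj⟩ := (PySem.Chars.exists_prefix_drop_iff_isIn _ _).mpr hisin
    by_cases hjt : j ≤ t.length
    · exact no_prefix_low t r ht j hjt hj
    · obtain ⟨m, hm⟩ : ∃ m, j - t.length = m + 1 := ⟨j - t.length - 1, by omega⟩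
      have hdrop : (t ++ ' ' :: r).drop j = r.drop m := by
        rw [List.drop_append, List.drop_of_length_le (by omega), List.nil_append, hm,
          List.drop_succ_cons]
      rw [hdrop] at hj
      rw [PySem.Chars.find_eq_neg_one_iff] at hr
      exact hr (hj.isInfix.trans (List.drop_suffix _ r).isInfix)
  · rw [if_neg hr]
    have hnn : 0 ≤ PySem.Chars.find r hlink := by
      have := PySem.Chars.neg_one_le_find r hlink; omega
    obtain ⟨hp, hmin⟩ := PySem.Chars.find_spec hnn
    rw [find_eq_of (t ++ ' ' :: r) hlink (t.length + 1 + (PySem.Chars.find r hlink).toNat) ?_ ?_]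
    · omega
    · rw [List.drop_append, List.drop_of_length_le (by omega),
        List.nil_append, show t.length + 1 + (PySem.Chars.find r hlink).toNat - t.length
          = (PySem.Chars.find r hlink).toNat + 1 by omega, List.drop_succ_cons]
      exact hp
    · intro i hik hpre
      by_cases hit : i ≤ t.length
      · exact no_prefix_low t r ht i hit hpre
      · rw [List.drop_append, List.drop_of_length_le (by omega),
          List.nil_append, show i - t.length = (i - t.length - 1) + 1 by omega,
          List.drop_succ_cons] at hpre
        exact hmin (i - t.length - 1) (by omega) hpre

theorem main_chars (cs : List Char) :
    (spl cs).find? (fun t => PySem.Chars.isIn hlink t) =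
      (if PySem.Chars.find cs hlink = -1 then none
       else some ((((spl (cs.take (PySem.Chars.find cs hlink).toNat)).getLast?).getD []) ++
                  (((spl (cs.drop (PySem.Chars.find cs hlink).toNat)).head?).getD []))) := by
  suffices H : ∀ (n : Nat) (cs : List Char), cs.length ≤ n →
      (spl cs).find? (fun t => PySem.Chars.isIn hlink t) =
      (if PySem.Chars.find cs hlink = -1 then none
       else some ((((spl (cs.take (PySem.Chars.find cs hlink).toNat)).getLast?).getD []) ++
                  (((spl (cs.drop (PySem.Chars.find cs hlink).toNat)).head?).getD []))) from
    H cs.length cs le_rfl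
  intro n
  induction n with
  | zero =>
    intro cs hlen
    have : cs = [] := List.eq_nil_of_length_eq_zero (Nat.le_zero.mp hlen)
    subst this
    decide
  | succ m ih =>
    intro cs hlen
    by_cases hsp : ' ' ∈ cs
    · -- cs = t ++ ' ' :: r with ' ' ∉ t
      set t := cs.takeWhile (fun c => c != ' ') with htdef
      set dw := cs.dropWhile (fun c => c != ' ') with hdwdef
      have hdwne : dw ≠ [] := by
        rw [hdwdef, Ne, List.dropWhile_eq_nil_iff]
        intro hall
        simpa using hall ' ' hsp
      have hhead : dw.head hdwne = ' ' := by
        have := List.head_dropWhile_not (fun c => c != ' ') hdwne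
        simpa using this
      set r := dw.tail with hrdef
      have hcs : cs = t ++ ' ' :: r := by
        conv_lhs => rw [← List.takeWhile_append_dropWhile (p := fun c => c != ' ') (l := cs)]
        rw [← htdef, ← hdwdef, ← hhead, List.cons_head_tail hdwne]
      have hnot : ' ' ∉ t := by
        intro hmem
        have := List.mem_takeWhile_imp hmem
        simp at this
      have hrlen : r.length ≤ m := by
        have : cs.length = t.length + 1 + r.length := by rw [hcs]; simp; omega
        omega
      rw [hcs, spl_sep t r hnot]
      by_cases hti : PySem.Chars.isIn hlink t = true
      · rw [List.find?_cons_of_pos hti, fcase1 t r hti]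
        obtain ⟨hnn, hft⟩ := find_mem_le t hti
        rw [hlink_len] at hft
        rw [if_neg (by omega)]
        set f := (PySem.Chars.find t hlink).toNat with hfdef
        have hfle : f ≤ t.length := by omega
        have htake : (t ++ ' ' :: r).take f = t.take f := List.take_append_of_le_length hfle
        have hdrop : (t ++ ' ' :: r).drop f = t.drop f ++ ' ' :: r := by
          rw [List.drop_append, Nat.sub_eq_zero_of_le hfle, List.drop_zero]
        rw [htake, hdrop]
        rw [spl_no_space _ (fun hm => hnot (List.take_subset _ _ hm)),
            spl_sep _ _ (fun hm => hnot (List.drop_subset _ _ hm))]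
        simp [List.take_append_drop]
      · have hti' : PySem.Chars.isIn hlink t = false := by simpa using hti
        rw [List.find?_cons_of_neg (by simp [hti']), fcase2 t r hti']
        by_cases hrf : PySem.Chars.find r hlink = -1
        · rw [if_pos hrf, if_pos rfl]
          have := ih r hrlen
          rw [if_pos hrf] at this
          exact this
        · have hrnn : 0 ≤ PySem.Chars.find r hlink := by
            have := PySem.Chars.neg_one_le_find r hlink; omega
          rw [if_neg hrf]
          rw [if_neg (by omega)]
          set fr := (PySem.Chars.find r hlink).toNat with hfrdef
          have htn : ((t.length : Int) + 1 + PySem.Chars.find r hlink).toNat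
              = t.length + 1 + fr := by omega
          rw [htn]
          have htake : (t ++ ' ' :: r).take (t.length + 1 + fr) = t ++ ' ' :: r.take fr := by
            rw [List.take_append, List.take_of_length_le (by omega),
              show t.length + 1 + fr - t.length = fr + 1 by omega, List.take_succ_cons]
          have hdrop : (t ++ ' ' :: r).drop (t.length + 1 + fr) = r.drop fr := by
            rw [List.drop_append, List.drop_of_length_le (by omega), List.nil_append,
              show t.length + 1 + fr - t.length = fr + 1 by omega, List.drop_succ_cons]
          rw [htake, hdrop, spl_sep _ _ hnot,
            getLast?_cons_of_ne_nil t (spl_ne_nil _)]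
          have hih := ih r hrlen
          rw [if_neg hrf, ← hfrdef] at hih
          exact hih
    · -- no space in cs
      rw [spl_no_space cs hsp]
      by_cases hin : PySem.Chars.isIn hlink cs = true
      · rw [List.find?_cons_of_pos hin]
        obtain ⟨hnn, hft⟩ := find_mem_le cs hin
        rw [hlink_len] at hft
        rw [if_neg (by omega)]
        set f := (PySem.Chars.find cs hlink).toNat
        rw [spl_no_space _ (fun hm => hsp (List.take_subset _ _ hm)),
            spl_no_space _ (fun hm => hsp (List.drop_subset _ _ hm))]
        simp [List.take_append_drop]
      · have hin' : PySem.Chars.isIn hlink cs = false := by simpa using hin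
        rw [List.find?_cons_of_neg (by simp [hin']), List.find?_nil,
          if_pos ((PySem.Chars.find_eq_neg_one_iff _ _).mpr
            ((PySem.Chars.isIn_eq_false_iff _ _).mp hin'))]

theorem split?_str (s : String) : ∃ ss : List String,
    PySem.Str.split? s " " = some ss ∧ ss.map String.toList = spl s.toList := by
  have h := PySem.Str.split?_map s " "
  rw [show (" " : String).toList = [' '] from rfl, split?_eq_spl] at h
  cases hs : PySem.Str.split? s " " with
  | none => rw [hs] at h; simp at h
  | some ss => rw [hs] at h; exact ⟨ss, rfl, by simpa using h⟩

theorem toListA (text : String) :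
    Option.map String.toList (extracting_hyperlink text) =
      (spl text.toList).find? (fun t => PySem.Chars.isIn hlink t) := by
  obtain ⟨ss, hs, hmap⟩ := split?_str text
  show Option.map String.toList
      (((PySem.Str.split? text " ").getD []).find? (fun i => PySem.Str.isIn "https://t.co/" i)) = _
  rw [hs, Option.getD_some, ← hmap, List.find?_map]
  rfl

theorem getD_toList (o : Option String) :
    (o.getD "").toList = (o.map String.toList).getD [] := by
  cases o <;> rfl

theorem alt_eq (text : String) : extracting_hyperlink_alt text =
    (if PySem.Chars.find text.toList hlink = -1 then none
     else some ((PySem.List.pyGet? ((PySem.Str.split? (PySem.Str.slice text none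
            (some (PySem.Chars.find text.toList hlink))) " ").getD []) (-1)).getD "" ++
        (PySem.List.pyGet? ((PySem.Str.split? (PySem.Str.slice text
            (some (PySem.Chars.find text.toList hlink)) none) " ").getD []) 0).getD "")) := rfl

theorem toListB (text : String) :
    Option.map String.toList (extracting_hyperlink_alt text) =
      (if PySem.Chars.find text.toList hlink = -1 then none
       else some ((((spl (text.toList.take (PySem.Chars.find text.toList hlink).toNat)).getLast?).getD []) ++
                  (((spl (text.toList.drop (PySem.Chars.find text.toList hlink).toNat)).head?).getD []))) := by
  rw [alt_eq]
  by_cases hneg : PySem.Chars.find text.toList hlink = -1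
  · rw [if_pos hneg, if_pos hneg]
    rfl
  · have h0 : 0 ≤ PySem.Chars.find text.toList hlink := by
      have := PySem.Chars.neg_one_le_find text.toList hlink; omega
    have hpre : (PySem.Str.slice text none (some (PySem.Chars.find text.toList hlink))).toList
        = text.toList.take (PySem.Chars.find text.toList hlink).toNat := by
      rw [PySem.Str.toList_slice, PySem.Chars.slice_eq_listSlice, PySem.List.slice_to _ h0]
    have hpost : (PySem.Str.slice text (some (PySem.Chars.find text.toList hlink)) none).toList
        = text.toList.drop (PySem.Chars.find text.toList hlink).toNat := by
      rw [PySem.Str.toList_slice, PySem.Chars.slice_eq_listSlice, PySem.List.slice_from _ h0]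
    obtain ⟨ss1, hs1, hm1⟩ :=
      split?_str (PySem.Str.slice text none (some (PySem.Chars.find text.toList hlink)))
    obtain ⟨ss2, hs2, hm2⟩ :=
      split?_str (PySem.Str.slice text (some (PySem.Chars.find text.toList hlink)) none)
    rw [hpre] at hm1
    rw [hpost] at hm2
    rw [if_neg hneg, if_neg hneg, hs1, hs2, Option.getD_some, Option.getD_some,
      pyGet?_neg_one, pyGet?_zero, Option.map_some, String.toList_append,
      getD_toList, getD_toList, ← List.getLast?_map, ← List.head?_map, hm1, hm2]

-- ===== VERDICT (by name: the statement is the Claim_ definition above) =====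
theorem extracting_hyperlink_spec : Claim_equal_extracting_hyperlink := by
  intro text _
  unfold Spec_extracting_hyperlink
  have h := (toListA text).trans ((main_chars text.toList).trans (toListB text).symm)
  have hinj : Function.Injective String.toList := by
    intro a b hab
    exact String.ext (by simpa [String.toList] using hab)
  exact Option.map_injective hinj h
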